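/-
  jsmn_d.bin / jsmn_s.bin: THE RE-ENTRANT CONTRACT OF jsmn_parse FROM THE INTERPRETER'S LITERAL START MACHINE — `_start_call6` calls jsmn_parse
  directly on a PREPARED parser state (the state an earlier call left), and the run ends at the stub's `hlt` with the model's answer: eax = r, the
  parser struct = p', the token array = toks'. The method and the generic lemmas are those of Prog/Jsmn/StartInst.lean and
  Prog/Inflate/Inst4Image.lean; written ONCE for a `Bin` `b` with its `Stub6 b A` (Prog/Jsmn/StartCall6.lean).

  `proofs/c6/harness.py: model_parse(k, js, len(js), parser, ntok, pre_tokens)` writes the file that `interp` loads at 100000H (offset = address - 100000H):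
        100000H  jsmn_k.bin (`b.image`)
        1FF000H  `struct.pack("<4Q", PARSER = 3FF000H, JS = 200000H, len(js), OUT = 400000H or 0)`          -> rdi rsi rdx rcx
        1FF020H  16 zero bytes (the stub stores rax at +20H)
        1FF030H  `struct.pack("<3Q", ntok, 0, jsmn_parse)`                                                  -> r8 r9, and the address `call rax` calls
        200000H  the text (at most INMAX = 1FF000H bytes), zero bytes up to
        3FF000H  `struct.pack("<IIi", pos, toknext, toksuper)`: THE PREPARED PARSER STATE; in counting mode (ntok None) THE FILE ENDS HERE
        400000H  the prepared token array (`pre_tokens`)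
  `parseImageBytes b js p toks N` is that file as a Lean byte list (`toks = none` = counting mode: tokens = NULL, no token bytes; `toks = some ts`:
  the `N` tokens `ts`, each as its sizeof(jsmntok_t) bytes); `parseStart b A c js p toks N` = `User.startMachine c (that file) A.entry 800000H` is
  THE LITERAL MACHINE at privilege level `c` (0 = what `Interp.setup` builds: `parseStart_setup`); `parseState b A c js p toks N` = `User.startState …`
  is its user state (what a program proof sees of it). The stack, 3FFFF8H, everything beyond the file: plain RAM, reads 0, and the proof needs
  nothing of it.

    parseStart_layout         its user state shows `Layout6` (Prog/Jsmn/StartCall6.lean): the parser struct `p`, the tokens `toks` — from the BYTES of the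
                              file (Prog/Jsmn/DecodeAt.lean), for a state whose fields fit 32 bits (`Inv`) and tokens that fit (`Token.Fits`)
    parse_from_start_cpl      machine level, c = 0 or 3: `X86.run` with the model's real decoder, any `μ` with `MicroOK μ`, from the literal start machine with
                              ANY UNKNOWN stream `ub` (`Machine.withUnknownBits`: the processor's answers where a value is undefined) to the stub's `hlt`: the result, the parser state and the tokens in memory are THE MODEL's, whatever it answers; + frame clause
    parse_from_start_total    the same with `Jsmn.parse` (no fuel): the model always answers (`Jsmn.parse_total`, js.length < 2^32)
    parse_halts               ring 0: the processor HALTS AND STAYS HALTED in that state (its physical memory, read flat: `User.Mem.ofPhys m.phys`)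
    parse_twice               TWO separate runs (one UNKNOWN stream each: `ub₁`, `ub₂`): the second file is made of the state the first run left; it again
                              computes the model
  The one hypothesis about the binary is `hparse : ParseSpec b (User.startLayout c hc)`; the only model-side hypothesis is `Inv` (+ the tokens fit their memory words).
  Nothing admitted, no axiom, no `native_decide`, no `bv_decide` in this file.
-/
import Prog.Jsmn.StartCall6
import Prog.Jsmn.StartInst
import Prog.Jsmn.DecodeAt
import Json.Jsmn.Safe
import Json.Jsmn.Total

namespace X86
namespace J6
namespace Call6
open X86.User (CodeAt RegsKept Span FlagsOK Layout toNat_add_ofNat toNat_ofNat_lt' add_ofNat_add)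
open Inst4 Jsmn Start

set_option maxRecDepth 100000
set_option maxHeartbeats 4000000
set_option linter.unusedSimpArgs false
set_option linter.unusedVariables false

/-! ### The file -/

/-- The parameter block at 1FF000H .. 1FF048H. -/
def paramBytes6 (b : Bin) (len N : Nat) (toks : Option Tokens) : List UInt8 :=
  le64 0x3ff000 ++ (le64 0x200000 ++ (le64 (UInt64.ofNat len) ++ (le64 (tbOf toks) ++ (zeros 16 ++ (le64 (UInt64.ofNat N) ++
    (le64 0 ++ le64 b.parse))))))

theorem paramBytes6_length (b : Bin) (len N : Nat) (toks : Option Tokens) : (paramBytes6 b len N toks).length = 72 := by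
  simp only [paramBytes6, List.length_append, zeros_length, le64_length]

/-- What follows the parser struct in the file: nothing in counting mode; else zero bytes up to 400000H and the token array. -/
def tokTail (cfg : Jsmn.Config) : Option Tokens → List UInt8
  | none => []
  | some ts => zeros (0x1000 - 12) ++ ts.flatMap (Token.bytes cfg)

theorem tokTail_length_le (cfg : Jsmn.Config) (toks : Option Tokens) (N : Nat) (hlen : ∀ ts, toks = some ts → ts.length = N)
    (hN : cfg.tokSize * N ≤ 0x3F8000) : (tokTail cfg toks).length ≤ 0x3F9000 := by
  cases toks with
  | none => simp [tokTail]
  | some ts =>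
    simp only [tokTail, List.length_append, zeros_length, Start.flatMap_bytes_length, hlen ts rfl]
    omega

/-- `harness.py: model_parse`'s file for the text `js`, the prepared parser state `p`, the prepared tokens `toks` (`none`: counting mode) and
`num_tokens = N`. -/
def parseImageBytes (b : Bin) (js : List UInt8) (p : Parser) (toks : Option Tokens) (N : Nat) : List UInt8 :=
  b.image ++ (zeros (0xFF000 - b.image.length) ++ (paramBytes6 b js.length N toks ++ (zeros (0x1000 - 72) ++ (js ++
    (zeros (0x1FF000 - js.length) ++ (parserBytes p ++ tokTail b.cfg toks))))))

def parseImage (b : Bin) (js : List UInt8) (p : Parser) (toks : Option Tokens) (N : Nat) : ByteArray := ⟨(parseImageBytes b js p toks N).toArray⟩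

/-- `interp FILE --mode 64 --base 0x100000 --entry <_start_call6> --esp 0x800000 --mem-mb 16` on that file, at privilege level `c`: THE LITERAL
MACHINE (`User.startMachine`); the page tables' Accessed / Dirty flags are CLEAR, nothing is preset. -/
def parseStart (b : Bin) (A : Addr6) (c : Nat) (js : List UInt8) (p : Parser) (toks : Option Tokens) (N : Nat) : Machine :=
  User.startMachine c (parseImage b js p toks N) A.entry 0x800000

/-- The user state of that start machine: what a program proof sees of it (registers, RIP, RFLAGS, flat memory). -/
def parseState (b : Bin) (A : Addr6) (c : Nat) (js : List UInt8) (p : Parser) (toks : Option Tokens) (N : Nat) : User.State :=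
  User.startState c (parseImage b js p toks N) A.entry 0x800000

section
variable {b : Bin} {A : Addr6} (hs : Stub6 b A) (c : Nat) (js : List UInt8) (p : Parser) (toks : Option Tokens) (N : Nat)
  (hjs : js.length ≤ INMAX) (hN : b.cfg.tokSize * N ≤ 0x3F8000) (hlen : ∀ ts, toks = some ts → ts.length = N)

theorem parseStart_rsp : (parseState b A c js p toks N).reg .rsp = 0x800000 := User.startState_rsp c _ _ _

theorem parseStart_rip : (parseState b A c js p toks N).rip = A.entry := User.startState_rip c _ _ _

include hs hjs

/-- Where the parser struct starts in the file: 2FF000H bytes in. -/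
theorem prefix_length :
    (b.image ++ (zeros (0xFF000 - b.image.length) ++ (paramBytes6 b js.length N toks ++ (zeros (0x1000 - 72) ++ (js ++
      zeros (0x1FF000 - js.length)))))).length = 0x2FF000 := by
  have := hs.len
  unfold INMAX at hjs
  simp only [List.length_append, zeros_length, paramBytes6_length]
  omega

include hN hlen

theorem parseImageBytes_length_le : (parseImageBytes b js p toks N).length ≤ 0xF00000 := by
  have := hs.len
  have := tokTail_length_le b.cfg toks N hlen hN
  unfold INMAX at hjs
  simp only [parseImageBytes, List.length_append, zeros_length, paramBytes6_length, parserBytes_length]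
  omega

theorem parseImage_size_le : (parseImage b js p toks N).size ≤ 0xF00000 := by
  show (parseImageBytes b js p toks N).toArray.size ≤ _
  rw [List.size_toArray]; exact parseImageBytes_length_le hs js p toks N hjs hN hlen

/-- **The literal start machine is in the user relation with its user state** (16 MB mapped), at ring 0 and at ring 3. -/
theorem parseStart_frame (hc : c = 0 ∨ c = 3) :
    User.Abs (User.startLayout c hc) (parseStart b A c js p toks N) (parseState b A c js p toks N) :=
  User.start_abs c hc _ _ _ (by have := parseImage_size_le hs js p toks N hjs hN hlen; omega)

/-- The image is in the start state's memory at 100000H. -/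
theorem parseStart_image (hc : c = 0 ∨ c = 3) : CodeAt (parseState b A c js p toks N).mem 0x100000 b.image := by
  exact User.startState_segment c hc (parseImageBytes b js p toks N) [] b.image
    (zeros (0xFF000 - b.image.length) ++ (paramBytes6 b js.length N toks ++ (zeros (0x1000 - 72) ++ (js ++
      (zeros (0x1FF000 - js.length) ++ (parserBytes p ++ tokTail b.cfg toks))))))
    0x100000 (by simp only [parseImageBytes, List.nil_append])
    (parseImageBytes_length_le hs js p toks N hjs hN hlen) (by rfl)

/-- The parameter block is at 1FF000H. -/
theorem parseStart_params (hc : c = 0 ∨ c = 3) : CodeAt (parseState b A c js p toks N).mem 0x1ff000 (paramBytes6 b js.length N toks) := by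
  have := hs.len
  exact User.startState_segment c hc (parseImageBytes b js p toks N) (b.image ++ zeros (0xFF000 - b.image.length)) (paramBytes6 b js.length N toks)
    (zeros (0x1000 - 72) ++ (js ++ (zeros (0x1FF000 - js.length) ++ (parserBytes p ++ tokTail b.cfg toks))))
    0x1ff000 (by simp only [parseImageBytes, List.append_assoc]) (parseImageBytes_length_le hs js p toks N hjs hN hlen)
    (by simp only [List.length_append, zeros_length, UInt64.reduceToNat]; omega)

/-- The text is at 200000H. -/
theorem parseStart_input (hc : c = 0 ∨ c = 3) : CodeAt (parseState b A c js p toks N).mem 0x200000 js := by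
  have := hs.len
  exact User.startState_segment c hc (parseImageBytes b js p toks N)
    (b.image ++ (zeros (0xFF000 - b.image.length) ++ (paramBytes6 b js.length N toks ++ zeros (0x1000 - 72)))) js
    (zeros (0x1FF000 - js.length) ++ (parserBytes p ++ tokTail b.cfg toks)) 0x200000
    (by simp only [parseImageBytes, List.append_assoc]) (parseImageBytes_length_le hs js p toks N hjs hN hlen)
    (by simp only [List.length_append, zeros_length, paramBytes6_length, UInt64.reduceToNat]; omega)

/-- The 12 bytes of the prepared parser state are at 3FF000H. -/
theorem parseStart_parserBytes (hc : c = 0 ∨ c = 3) : CodeAt (parseState b A c js p toks N).mem 0x3ff000 (parserBytes p) := by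
  exact User.startState_segment c hc (parseImageBytes b js p toks N)
    (b.image ++ (zeros (0xFF000 - b.image.length) ++ (paramBytes6 b js.length N toks ++ (zeros (0x1000 - 72) ++ (js ++
      zeros (0x1FF000 - js.length)))))) (parserBytes p) (tokTail b.cfg toks) 0x3ff000
    (by simp only [parseImageBytes, List.append_assoc]) (parseImageBytes_length_le hs js p toks N hjs hN hlen)
    (by rw [prefix_length hs js toks N hjs]; rfl)

/-- The bytes of the prepared token array are at 400000H. -/
theorem parseStart_tokBytes (hc : c = 0 ∨ c = 3) (ts : Tokens) (ht : toks = some ts) :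
    CodeAt (parseState b A c js p toks N).mem 0x400000 (ts.flatMap (Token.bytes b.cfg)) := by
  subst ht
  refine User.startState_segment c hc (parseImageBytes b js p (some ts) N)
    ((b.image ++ (zeros (0xFF000 - b.image.length) ++ (paramBytes6 b js.length N (some ts) ++ (zeros (0x1000 - 72) ++ (js ++
      zeros (0x1FF000 - js.length)))))) ++ (parserBytes p ++ zeros (0x1000 - 12))) (ts.flatMap (Token.bytes b.cfg)) [] 0x400000
    (by simp only [parseImageBytes, tokTail, List.append_assoc, List.append_nil]) (parseImageBytes_length_le hs js p (some ts) N hjs hN hlen) ?_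
  rw [List.length_append, prefix_length hs js (some ts) N hjs, List.length_append, parserBytes_length, zeros_length]
  rfl

/-- The seven quadwords of the parameter block, as `_start_call6`'s loads read them. -/
theorem parseStart_args (hc : c = 0 ∨ c = 3) :
    let μ := (parseState b A c js p toks N).mem
    UInt64.ofNat (μ.readLE 0x1ff000 8) = 0x3ff000 ∧ UInt64.ofNat (μ.readLE 0x1ff008 8) = 0x200000 ∧
    UInt64.ofNat (μ.readLE 0x1ff010 8) = UInt64.ofNat js.length ∧ UInt64.ofNat (μ.readLE 0x1ff018 8) = tbOf toks ∧
    UInt64.ofNat (μ.readLE 0x1ff030 8) = UInt64.ofNat N ∧ UInt64.ofNat (μ.readLE 0x1ff038 8) = 0 ∧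
    UInt64.ofNat (μ.readLE 0x1ff040 8) = b.parse := by
  intro μ
  have h := parseStart_params hs c js p toks N hjs hN hlen hc
  unfold paramBytes6 at h
  obtain ⟨h0, h⟩ := CodeAt.split h
  obtain ⟨h1, h⟩ := CodeAt.split h
  obtain ⟨h2, h⟩ := CodeAt.split h
  obtain ⟨h3, h⟩ := CodeAt.split h
  obtain ⟨_, h⟩ := CodeAt.split h
  obtain ⟨h4, h⟩ := CodeAt.split h
  obtain ⟨h5, h6⟩ := CodeAt.split h
  simp only [le64_length, zeros_length] at h1 h2 h3 h4 h5 h6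
  exact ⟨read64_le64 h0, read64_le64 (a := 0x1ff008) h1, read64_le64 (a := 0x1ff010) h2, read64_le64 (a := 0x1ff018) h3,
    read64_le64 (a := 0x1ff030) h4, read64_le64 (a := 0x1ff038) h5, read64_le64 (a := 0x1ff040) h6⟩

/-- **The user state of the literal start machine shows harness.py's layout of a `parse` run**: the prepared parser state and tokens are in memory, read
off the bytes of the file. `Inv` gives the ranges of the parser's fields; the tokens must fit their memory words. -/
theorem parseStart_layout (hc : c = 0 ∨ c = 3) (hinv : Inv b.cfg p toks N) (hfit : ∀ ts, toks = some ts → ∀ t ∈ ts, Token.Fits b.cfg t) :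
    Layout6 b A (parseState b A c js p toks N) js p toks N := by
  obtain ⟨g0, g1, g2, g3, g4, g5, g6⟩ := parseStart_args hs c js p toks N hjs hN hlen hc
  refine ⟨parseStart_rip c js p toks N, parseStart_rsp c js p toks N, parseStart_image hs c js p toks N hjs hN hlen hc, g0, g1, g2, g3, g4, g5, g6,
    parseStart_input hs c js p toks N hjs hN hlen hc,
    parserAt_of_bytes (parseStart_parserBytes hs c js p toks N hjs hN hlen hc) hinv.pos hinv.toknextR hinv.superR, ?_⟩
  cases htk : toks with
  | none => exact rfl
  | some ts =>
    have h := parseStart_tokBytes hs c js p toks N hjs hN hlen hc ts htk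
    rw [htk] at h
    exact ⟨by show (0x400000 : Word) ≠ 0; decide, hlen ts htk, tokensAt_of_bytes h (hfit ts htk)⟩

/-- `parseStart b A 0 ..` is, literally, the machine `Interp.setup` returns for `harness.py`'s command line on `harness.py`'s file (`e` = the stub's
address as a number: 1005E0H / 1006B0H). -/
theorem parseStart_setup (image : String) (e : Nat) (he : UInt64.ofNat e = A.entry) :
    Interp.setup { image := image, mode := 64, base := 0x100000, entry := some e, esp := 0x800000 } (parseImage b js p toks N) =
      .ok (parseStart b A 0 js p toks N) := by
  have h := User.setup_eq image (parseImage b js p toks N) e 0x800000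
    (by have := parseImage_size_le hs js p toks N hjs hN hlen; omega) (by decide)
  rw [h]; unfold parseStart; rw [he]; rfl

end

/-! ### The run, machine level -/

section
variable {b : Bin} {A : Addr6} (hs : Stub6 b A) (c : Nat) (hc : c = 0 ∨ c = 3) (hparse : ParseSpec b (User.startLayout c hc))
  (μ : Microarch) (hμ : MicroOK μ) (ub : Nat → Bool)
  (js : List UInt8) (p : Parser) (toks : Option Tokens) (N : Nat) (hjs : js.length ≤ INMAX) (hN : b.cfg.tokSize * N ≤ 0x3F8000)
  (hinv : Inv b.cfg p toks N) (hfit : ∀ ts, toks = some ts → ∀ t ∈ ts, Token.Fits b.cfg t)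
include hs hparse hμ hjs hN hinv hfit

/-- **THE RE-ENTRANT CONTRACT OF jsmn_parse, FROM THE INTERPRETER'S LITERAL START STATE** (c = 0 or 3): for every text `js` of at most INMAX = 1FF000H
bytes, every `N` with sizeof(jsmntok_t) * N ≤ 3F8000H, EVERY prepared parser state `p` and prepared tokens `toks` (`none`: counting mode) that
satisfy `Inv` — the state an earlier call left does (`SafeFacts.parse`) — `X86.run` with the model's real decoder (any `μ` with `MicroOK μ`) from the machine
`interp` builds for harness.py's file (page tables' A/D flags clear, NO preset), with any UNKNOWN stream `ub` (`Machine.withUnknownBits`), runs the stub's seven loads and its `call rax`, THE COMPILED jsmn_parse,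
the two stores of rax, and stands at the stub's `hlt` with eax = r, the parser struct = p', the tokens = toks' — WHATEVER the model `Jsmn.parseFuel`
answers from `(p, toks)`; no validity assumption on the text — and nothing else changed (`AtEnd6.same`). The machine `m'` is in the user relation
with a user state `v'` that says so; the system part of the machine is untouched. -/
theorem parse_from_start_cpl {fuel : Nat} {r : Int} {p' : Parser} {toks' : Option Tokens}
    (hmodel : parseFuel b.cfg fuel js p toks N = some (r, p', toks')) :
    ∃ k m' v', _root_.X86.run (Dec.decoder μ (Dec.mkTable X86.allRows)) ((parseStart b A c js p toks N).withUnknownBits ub) k = .next m' ∧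
      User.Abs (User.startLayout c hc) m' v' ∧
      AtEnd6 b A (parseState b A c js p toks N) toks N r p' toks' v' ∧
      m'.sysPart = ((parseStart b A c js p toks N).withUnknownBits ub).sysPart := by
  have hjs' : js.length ≤ 0x1FF000 := hjs
  have hlen : ∀ ts, toks = some ts → ts.length = N := fun ts h => (hinv.toks ts h).len
  have hreach := parse_from_start_reach (n := User.startLayout c hc) rfl hs hparse
    (parseStart_layout hs c js p toks N hjs hN hlen hc hinv hfit) hjs' hN hinv hmodel
  exact hreach.sound μ hμ ((parseStart b A c js p toks N).withUnknownBits ub) ((parseStart_frame hs c js p toks N hjs hN hlen hc).withUnknownBits ub)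

/-- **The same without fuel**: the model `Jsmn.parse` always answers (`Jsmn.parse_total`; the text is shorter than 2^32), and the run — from the start
machine with any UNKNOWN stream `ub` — ends with ITS answer. -/
theorem parse_from_start_total :
    ∃ r p' toks', Jsmn.parse b.cfg js p toks N = some (r, p', toks') ∧
      ∃ k m' v', _root_.X86.run (Dec.decoder μ (Dec.mkTable X86.allRows)) ((parseStart b A c js p toks N).withUnknownBits ub) k = .next m' ∧
        User.Abs (User.startLayout c hc) m' v' ∧
        AtEnd6 b A (parseState b A c js p toks N) toks N r p' toks' v' ∧
        m'.sysPart = ((parseStart b A c js p toks N).withUnknownBits ub).sysPart := by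
  have hjs' : js.length < 4294967296 := by unfold INMAX at hjs; omega
  obtain ⟨⟨r, p', toks'⟩, hres⟩ := Jsmn.parse_total b.cfg js p toks N hjs' hinv
  exact ⟨r, p', toks', hres, parse_from_start_cpl hs c hc hparse μ hμ ub js p toks N hjs hN hinv hfit (fuel := js.length + 1) hres⟩

end

/-! ### The final HLT -/

/-- Memory that agrees with `μ` on the user region of the 16 MB layout (100000H .. 1000000H) keeps the `tokens` argument (NULL, or an array of at
most 3F8000H bytes at 400000H). -/
theorem toksArg_of_eqOn {cfg : Jsmn.Config} {μ ν : User.Mem} {toks tk : Option Tokens} {N : Nat} (h : ToksArg cfg μ (tbOf toks) N tk)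
    (hN : cfg.tokSize * N ≤ 0x3F8000) (he : User.Mem.EqOn 0x100000 0x1000000 μ ν) : ToksArg cfg ν (tbOf toks) N tk := by
  cases tk with
  | none => exact h
  | some ts =>
    obtain ⟨h0, hl, ht⟩ := h
    cases toks with
    | none => exact absurd rfl h0
    | some t0 =>
      have e : (tbOf (some t0)).toNat = 0x400000 := rfl
      exact ⟨h0, hl, ht.frame (he.mono (by rw [e]; omega) (by rw [e, hl]; omega)) (by rw [e, hl]; omega)⟩

section
variable {b : Bin} {A : Addr6} (hs : Stub6 b A) (hparse : ParseSpec b (User.startLayout 0 (Or.inl rfl))) (μ : Microarch) (hμ : MicroOK μ)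
  (ub : Nat → Bool) (js : List UInt8) (p : Parser) (toks : Option Tokens) (N : Nat) (hjs : js.length ≤ INMAX) (hN : b.cfg.tokSize * N ≤ 0x3F8000)
  (hinv : Inv b.cfg p toks N) (hfit : ∀ ts, toks = some ts → ∀ t ∈ ts, Token.Fits b.cfg t) (hA : 0x100000 ≤ A.hlt.toNat ∧ A.hlt.toNat + 15 ≤ 0x1000000)
include hs hparse hμ hjs hN hinv hfit hA

/-- **THE RUN HALTS AND STAYS HALTED WITH THE MODEL'S ANSWER IN PLACE** (ring 0, the interpreter's start machine with any UNKNOWN stream `ub`): from some step on, every machine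
of the run is halted, eax = r, and its physical memory (read flat: `User.Mem.ofPhys m.phys`) holds the parser struct p', the tokens toks' and
r at 3FFFF8H. -/
theorem parse_halts {fuel : Nat} {r : Int} {p' : Parser} {toks' : Option Tokens}
    (hmodel : parseFuel b.cfg fuel js p toks N = some (r, p', toks')) :
    ∃ K, ∀ j, K ≤ j → ∃ m, _root_.X86.run (Dec.decoder μ (Dec.mkTable X86.allRows)) ((parseStart b A 0 js p toks N).withUnknownBits ub) j = .next m ∧
      m.activity = .halted ∧ m.reg .rax = UInt64.ofNat (u32 r) ∧ (User.Mem.ofPhys m.phys).readLE 0x3ffff8 8 = u32 r ∧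
      ParserAt (User.Mem.ofPhys m.phys) 0x3ff000 p' ∧ ToksArg b.cfg (User.Mem.ofPhys m.phys) (tbOf toks) N toks' := by
  obtain ⟨k, m', v', hk, ha, he, _⟩ := parse_from_start_cpl hs 0 (Or.inl rfl) hparse μ hμ ub js p toks N hjs hN hinv hfit hmodel
  have hrip : v'.rip = A.hlt := he.rip
  have hhlt' : CodeAt v'.mem v'.rip [0xF4] := by rw [hrip]; exact he.hlt
  have hhas : (User.startLayout 0 (Or.inl rfl)).Has v'.rip 15 := by
    rw [hrip]
    exact ⟨hA.1, hA.2⟩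
  have H := Halt.run_hlt_halted (L := User.startLayout 0 (Or.inl rfl)) rfl μ hμ ha hhlt' hhas
  refine ⟨k + 1, fun j hj => ?_⟩
  obtain ⟨mj, hrun, hq, hregs, _, _, _, hmem⟩ := H (j - k) (by omega)
  have heq : User.Mem.EqOn 0x100000 0x1000000 v'.mem (User.Mem.ofPhys mj.phys) := fun a h1 h2 => hmem a ⟨h1, h2⟩
  refine ⟨mj, ?_, hq.activity, ?_, ?_, ?_, ?_⟩
  · have := run_add (Dec.decoder μ (Dec.mkTable X86.allRows)) _ m' k (j - k) hk
    rw [show k + (j - k) = j by omega] at this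
    rw [this, hrun]
  · have : mj.reg .rax = v'.reg .rax := by unfold Machine.reg User.State.reg; rw [hregs]
    rw [this]; exact he.rax
  · rw [heq.readLE 0x3ffff8 8 (by decide) (by decide) (by decide)]; exact he.slot
  · exact he.parser.frame (heq.mono (by decide) (by decide)) (by decide)
  · exact toksArg_of_eqOn he.toksArg hN heq

end

/-! ### Two runs: the second starts from the state the first left -/

section
variable {b : Bin} {A : Addr6} (hs : Stub6 b A) (c : Nat) (hc : c = 0 ∨ c = 3) (hparse : ParseSpec b (User.startLayout c hc))
  (μ : Microarch) (hμ : MicroOK μ) (ub₁ ub₂ : Nat → Bool)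
  (js1 js2 : List UInt8) (p : Parser) (toks : Option Tokens) (N : Nat) (hjs1 : js1.length ≤ INMAX) (hjs2 : js2.length ≤ INMAX)
  (hN : b.cfg.tokSize * N ≤ 0x3F8000) (hinv : Inv b.cfg p toks N) (hfit : ∀ ts, toks = some ts → ∀ t ∈ ts, Token.Fits b.cfg t)
include hs hparse hμ hjs1 hjs2 hN hinv hfit

/-- **CALL jsmn_parse AGAIN WITH THE STATE THE PREVIOUS CALL LEFT, AND IT AGAIN COMPUTES THE MODEL** — as a statement about two separate runs (like
gzip's round trip; each run's start machine carries its own UNKNOWN stream, `ub₁` and `ub₂`, any two): the first run, on the text `js1` from the prepared state `(p, toks)`, ends with the model's `(r1, p1, toks1)` in memory; the file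
of the second run is made of exactly that state (`parseStart … js2 p1 toks1 N`: same `num_tokens`, any text `js2` — the same text again after
JSMN_ERROR_NOMEM / JSMN_ERROR_PART, or more of it) and it ends with the model's answer from `(p1, toks1)`. Nothing is assumed of the second state:
`Inv` holds of it because jsmn_parse re-establishes it (`SafeFacts.parse`), and its tokens fit because they were read from memory. -/
theorem parse_twice {fuel1 fuel2 : Nat} {r1 r2 : Int} {p1 p2 : Parser} {toks1 toks2 : Option Tokens}
    (h1 : parseFuel b.cfg fuel1 js1 p toks N = some (r1, p1, toks1)) (h2 : parseFuel b.cfg fuel2 js2 p1 toks1 N = some (r2, p2, toks2)) :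
    (∃ k m' v', _root_.X86.run (Dec.decoder μ (Dec.mkTable X86.allRows)) ((parseStart b A c js1 p toks N).withUnknownBits ub₁) k = .next m' ∧
      User.Abs (User.startLayout c hc) m' v' ∧
      AtEnd6 b A (parseState b A c js1 p toks N) toks N r1 p1 toks1 v' ∧
      m'.sysPart = ((parseStart b A c js1 p toks N).withUnknownBits ub₁).sysPart) ∧
    (∃ k m' v', _root_.X86.run (Dec.decoder μ (Dec.mkTable X86.allRows)) ((parseStart b A c js2 p1 toks1 N).withUnknownBits ub₂) k = .next m' ∧
      User.Abs (User.startLayout c hc) m' v' ∧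
      AtEnd6 b A (parseState b A c js2 p1 toks1 N) toks1 N r2 p2 toks2 v' ∧
      m'.sysPart = ((parseStart b A c js2 p1 toks1 N).withUnknownBits ub₂).sysPart) := by
  have run1 := parse_from_start_cpl hs c hc hparse μ hμ ub₁ js1 p toks N hjs1 hN hinv hfit h1
  refine ⟨run1, ?_⟩
  obtain ⟨_, m1, v1, _, _, he1, _⟩ := run1
  have hinv1 := ((Jsmn.safeFacts b.cfg).parse fuel1 js1 p toks N r1 p1 toks1 hinv h1).1
  have hfit1 : ∀ ts, toks1 = some ts → ∀ t ∈ ts, Token.Fits b.cfg t := by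
    intro ts hts
    have h := he1.toksArg
    rw [hts] at h
    exact h.2.2.fits
  exact parse_from_start_cpl hs c hc hparse μ hμ ub₂ js2 p1 toks1 N hjs2 hN hinv1 hfit1 h2

end

/-! ### The two binaries -/

section
variable (c : Nat) (hc : c = 0 ∨ c = 3) (μ : Microarch) (hμ : MicroOK μ) (ub : Nat → Bool) (js : List UInt8) (p : Parser) (toks : Option Tokens) (N : Nat)
  (hjs : js.length ≤ INMAX)
include hμ hjs

/-- jsmn_d.bin (default configuration, 16-byte tokens: `N ≤ 3F800H`), entry 1005E0H, `hlt` at 10062AH; the start machine carries any UNKNOWN stream `ub`. -/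
theorem parse_from_start_D (hparse : ParseSpec binD (User.startLayout c hc)) (hN : 16 * N ≤ 0x3F8000) (hinv : Inv binD.cfg p toks N)
    (hfit : ∀ ts, toks = some ts → ∀ t ∈ ts, Token.Fits binD.cfg t) {fuel : Nat} {r : Int} {p' : Parser} {toks' : Option Tokens}
    (hmodel : parseFuel binD.cfg fuel js p toks N = some (r, p', toks')) :
    ∃ k m' v', _root_.X86.run (Dec.decoder μ (Dec.mkTable X86.allRows)) ((parseStart binD addrD c js p toks N).withUnknownBits ub) k = .next m' ∧
      User.Abs (User.startLayout c hc) m' v' ∧ AtEnd6 binD addrD (parseState binD addrD c js p toks N) toks N r p' toks' v' ∧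
      m'.sysPart = ((parseStart binD addrD c js p toks N).withUnknownBits ub).sysPart :=
  parse_from_start_cpl stub6D c hc hparse μ hμ ub js p toks N hjs hN hinv hfit hmodel

/-- jsmn_s.bin (-DJSMN_STRICT -DJSMN_PARENT_LINKS, 20-byte tokens), entry 1006B0H, `hlt` at 1006FAH; the start machine carries any UNKNOWN stream `ub`. -/
theorem parse_from_start_S (hparse : ParseSpec binS (User.startLayout c hc)) (hN : 20 * N ≤ 0x3F8000) (hinv : Inv binS.cfg p toks N)
    (hfit : ∀ ts, toks = some ts → ∀ t ∈ ts, Token.Fits binS.cfg t) {fuel : Nat} {r : Int} {p' : Parser} {toks' : Option Tokens}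
    (hmodel : parseFuel binS.cfg fuel js p toks N = some (r, p', toks')) :
    ∃ k m' v', _root_.X86.run (Dec.decoder μ (Dec.mkTable X86.allRows)) ((parseStart binS addrS c js p toks N).withUnknownBits ub) k = .next m' ∧
      User.Abs (User.startLayout c hc) m' v' ∧ AtEnd6 binS addrS (parseState binS addrS c js p toks N) toks N r p' toks' v' ∧
      m'.sysPart = ((parseStart binS addrS c js p toks N).withUnknownBits ub).sysPart :=
  parse_from_start_cpl stub6S c hc hparse μ hμ ub js p toks N hjs hN hinv hfit hmodel

end

section
variable (μ : Microarch) (hμ : MicroOK μ) (ub : Nat → Bool) (js : List UInt8) (p : Parser) (toks : Option Tokens) (N : Nat) (hjs : js.length ≤ INMAX)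
include hμ hjs

/-- jsmn_d.bin: the ring-0 run, from the start machine with any UNKNOWN stream `ub`, halts and stays halted with the model's answer in place. -/
theorem parse_halts_D (hparse : ParseSpec binD (User.startLayout 0 (Or.inl rfl))) (hN : 16 * N ≤ 0x3F8000) (hinv : Inv binD.cfg p toks N)
    (hfit : ∀ ts, toks = some ts → ∀ t ∈ ts, Token.Fits binD.cfg t) {fuel : Nat} {r : Int} {p' : Parser} {toks' : Option Tokens}
    (hmodel : parseFuel binD.cfg fuel js p toks N = some (r, p', toks')) :
    ∃ K, ∀ j, K ≤ j → ∃ m, _root_.X86.run (Dec.decoder μ (Dec.mkTable X86.allRows)) ((parseStart binD addrD 0 js p toks N).withUnknownBits ub) j = .next m ∧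
      m.activity = .halted ∧ m.reg .rax = UInt64.ofNat (u32 r) ∧ (User.Mem.ofPhys m.phys).readLE 0x3ffff8 8 = u32 r ∧
      ParserAt (User.Mem.ofPhys m.phys) 0x3ff000 p' ∧ ToksArg binD.cfg (User.Mem.ofPhys m.phys) (tbOf toks) N toks' :=
  parse_halts stub6D hparse μ hμ ub js p toks N hjs hN hinv hfit (by decide) hmodel

/-- jsmn_s.bin: the ring-0 run, from the start machine with any UNKNOWN stream `ub`, halts and stays halted with the model's answer in place. -/
theorem parse_halts_S (hparse : ParseSpec binS (User.startLayout 0 (Or.inl rfl))) (hN : 20 * N ≤ 0x3F8000) (hinv : Inv binS.cfg p toks N)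
    (hfit : ∀ ts, toks = some ts → ∀ t ∈ ts, Token.Fits binS.cfg t) {fuel : Nat} {r : Int} {p' : Parser} {toks' : Option Tokens}
    (hmodel : parseFuel binS.cfg fuel js p toks N = some (r, p', toks')) :
    ∃ K, ∀ j, K ≤ j → ∃ m, _root_.X86.run (Dec.decoder μ (Dec.mkTable X86.allRows)) ((parseStart binS addrS 0 js p toks N).withUnknownBits ub) j = .next m ∧
      m.activity = .halted ∧ m.reg .rax = UInt64.ofNat (u32 r) ∧ (User.Mem.ofPhys m.phys).readLE 0x3ffff8 8 = u32 r ∧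
      ParserAt (User.Mem.ofPhys m.phys) 0x3ff000 p' ∧ ToksArg binS.cfg (User.Mem.ofPhys m.phys) (tbOf toks) N toks' :=
  parse_halts stub6S hparse μ hμ ub js p toks N hjs hN hinv hfit (by decide) hmodel

end

section
variable (js : List UInt8) (p : Parser) (toks : Option Tokens) (N : Nat) (hjs : js.length ≤ INMAX)
include hjs

/-- The ring-0 start machines are, literally, what `Interp.setup` returns for harness.py's command lines (`--entry 0x1005e0` / `--entry 0x1006b0`). -/
theorem parseStart_setup_D (image : String) (hN : 16 * N ≤ 0x3F8000) (hlen : ∀ ts, toks = some ts → ts.length = N) :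
    Interp.setup { image := image, mode := 64, base := 0x100000, entry := some 0x1005e0, esp := 0x800000 } (parseImage binD js p toks N) =
      .ok (parseStart binD addrD 0 js p toks N) :=
  parseStart_setup stub6D js p toks N hjs hN hlen image 0x1005e0 rfl

theorem parseStart_setup_S (image : String) (hN : 20 * N ≤ 0x3F8000) (hlen : ∀ ts, toks = some ts → ts.length = N) :
    Interp.setup { image := image, mode := 64, base := 0x100000, entry := some 0x1006b0, esp := 0x800000 } (parseImage binS js p toks N) =
      .ok (parseStart binS addrS 0 js p toks N) :=
  parseStart_setup stub6S js p toks N hjs hN hlen image 0x1006b0 rfl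

end

end Call6
end J6
end X86

#print axioms X86.J6.Call6.parse_from_start_cpl
#print axioms X86.J6.Call6.parse_from_start_total
#print axioms X86.J6.Call6.parse_halts
#print axioms X86.J6.Call6.parse_twice
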